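-- pv_equiv track=rewrite | github.com/ElNosnhoj/micronos | nos/acc/WS2812x.py | gradient_rainbow
-- ===== SOURCE A (Python) =====
-- def RGB(r, g, b, a=1.0):
--     """ returns int given r,g,b,a values. """
--     return int(r*a)<<16 | int(g*a)<<8 | int(b*a)
--
-- def gradient_rainbow(val):
--     """ Provides 0-255 gradient rainbow rgb values """
--     val = int(val)
--     r=g=b=0
--     if val<0: return gradient_rainbow(val+0xff)
--     if val>255: return gradient_rainbow(val-0xff)
--     elif val<85:
--         g=int(val*3)
--         r=255-g
--     elif val<170:
--         val-=85
--         b=int(val*3)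
--         g=255-b
--     else:
--         val-=170
--         r=int(val*3)
--         b=255-r
--     return RGB(r,g,b)
-- ===== SOURCE B (Python) =====
-- def gradient_rainbow(val):
--     """ Provides 0-255 gradient rainbow rgb values """
--     val = int(val)
--     while val < 0:
--         val += 255
--     while val > 255:
--         val -= 255
--     s = min(val // 85, 2)
--     t = 3 * (val - 85 * s)
--     r, g, b = ((255 - t, t, 0), (0, 255 - t, t), (t, 0, 255 - t))[s]
--     return r << 16 | g << 8 | b
-- ===== Notes on version B (the rewrite author's own statement) =====
-- stated objective: idiomatic
-- what changed: Replaces A's 255-step recursion and if/elif colour branches by two iterative normalization loops plus an arithmetic segment index s = min(val//85, 2) selecting (r,g,b) from a role-rotation table.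
-- outside the precondition, e.g. on gradient_rainbow(250000): A returns 53805, B returns 53805; on gradient_rainbow(-250000): A returns 11730, B returns 11730
import Mathlib
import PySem

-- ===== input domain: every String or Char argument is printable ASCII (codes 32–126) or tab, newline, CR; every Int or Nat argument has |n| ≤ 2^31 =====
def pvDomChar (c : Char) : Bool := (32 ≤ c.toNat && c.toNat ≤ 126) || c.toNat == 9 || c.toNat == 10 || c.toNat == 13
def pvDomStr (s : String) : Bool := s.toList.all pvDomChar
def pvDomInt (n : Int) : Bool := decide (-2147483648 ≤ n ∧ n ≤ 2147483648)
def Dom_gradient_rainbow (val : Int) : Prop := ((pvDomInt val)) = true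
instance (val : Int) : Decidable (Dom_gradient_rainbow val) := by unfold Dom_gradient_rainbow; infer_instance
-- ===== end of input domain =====

-- B replaces A's 255-step recursion and if/elif colour branches by two iterative
-- normalization loops plus an arithmetic segment index selecting (r,g,b) from a
-- role-rotation table (idiomatic decomposition, same cost).


-- ===== PORT A =====
-- RGB(r,g,b) with default a=1.0: int(x*1.0) = x exactly for the small nonnegative ints
-- produced here, so the port drops the float multiplication.
def pvRGB (r g b : Int) : Int := PySem.Int.bor (PySem.Int.bor (r <<< (16:Nat)) (g <<< (8:Nat))) b

def gradient_rainbow (val : Int) : Int :=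
  if val < 0 then gradient_rainbow (val + 255)
  else if val > 255 then gradient_rainbow (val - 255)
  else if val < 85 then
    let g := val * 3
    let r := 255 - g
    pvRGB r g 0
  else if val < 170 then
    let v := val - 85
    let b := v * 3
    let g := 255 - b
    pvRGB 0 g b
  else
    let v := val - 170
    let r := v * 3
    let b := 255 - r
    pvRGB r 0 b
termination_by (if val < 0 then 255 - val else val).toNat
decreasing_by all_goals (split_ifs <;> omega)

-- ===== PORT B =====
-- while val < 0: val += 255
def pvWhileNeg (v : Int) : Int :=
  if v < 0 then pvWhileNeg (v + 255) else v
termination_by (-v).toNat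
decreasing_by omega

-- while val > 255: val -= 255
def pvWhileHigh (v : Int) : Int :=
  if v > 255 then pvWhileHigh (v - 255) else v
termination_by v.toNat
decreasing_by omega

def gradient_rainbow_alt (val : Int) : Int :=
  let v := pvWhileHigh (pvWhileNeg val)
  let s := min (PySem.Int.floordiv v 85) 2
  let t := 3 * (v - 85 * s)
  -- s ∈ {0,1,2}, so the Python tuple lookup never fails; the .getD default is unreachable
  let rgb := (PySem.List.pyGet? [(255 - t, t, 0), ((0 : Int), 255 - t, t), (t, 0, 255 - t)] s).getD (0, 0, 0)
  PySem.Int.bor (PySem.Int.bor (rgb.1 <<< (16:Nat)) (rgb.2.1 <<< (8:Nat))) rgb.2.2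

-- ===== PRECONDITION & SPEC =====
-- Pre_ excludes |val| > 245000: A recurses one stack frame per 255 of |val| and hits
-- Python's recursion limit (RecursionError) near |val| ≈ 254000; the margin below that
-- boundary allows for stack-depth variation between runs.
def Pre_gradient_rainbow (val : Int) : Prop := -245000 ≤ val ∧ val ≤ 245000
instance (val : Int) : Decidable (Pre_gradient_rainbow val) := by unfold Pre_gradient_rainbow; infer_instance

def pvWitness_gradient_rainbow : Int := 128

def Spec_gradient_rainbow (val : Int) (out : Int) : Prop := out = gradient_rainbow_alt val
instance (val : Int) (out : Int) : Decidable (Spec_gradient_rainbow val out) := by unfold Spec_gradient_rainbow; infer_instance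

-- ===== CLAIM (what is proved, stated in full; the proofs are below) =====
def Claim_equal_gradient_rainbow : Prop := ∀ (val : Int), Dom_gradient_rainbow val → Pre_gradient_rainbow val → Spec_gradient_rainbow val (gradient_rainbow val)

-- ===== LEMMAS AND PROOFS =====

theorem pvWhileNeg_id (v : Int) (h : 0 ≤ v) : pvWhileNeg v = v := by
  rw [pvWhileNeg, if_neg (by omega)]

theorem pvWhileHigh_id (v : Int) (h : v ≤ 255) : pvWhileHigh v = v := by
  rw [pvWhileHigh, if_neg (by omega)]

theorem alt_neg (val : Int) (h : val < 0) :
    gradient_rainbow_alt val = gradient_rainbow_alt (val + 255) := by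
  have hn : pvWhileNeg val = pvWhileNeg (val + 255) := by
    rw [pvWhileNeg, if_pos h]
  unfold gradient_rainbow_alt
  rw [hn]

theorem alt_high (val : Int) (h : 255 < val) :
    gradient_rainbow_alt val = gradient_rainbow_alt (val - 255) := by
  have hn : pvWhileHigh (pvWhileNeg val) = pvWhileHigh (pvWhileNeg (val - 255)) := by
    rw [pvWhileNeg_id val (by omega), pvWhileNeg_id (val - 255) (by omega),
        pvWhileHigh, if_pos h]
  unfold gradient_rainbow_alt
  rw [hn]

theorem base_eq (val : Int) (h0 : 0 ≤ val) (h1 : val ≤ 255) :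
    gradient_rainbow val = gradient_rainbow_alt val := by
  unfold gradient_rainbow gradient_rainbow_alt
  rw [pvWhileNeg_id val h0, pvWhileHigh_id val h1,
      if_neg (by omega : ¬ val < 0), if_neg (by omega : ¬ val > 255)]
  by_cases hA : val < 85
  · have hs : min (PySem.Int.floordiv val 85) 2 = 0 := by
      have : PySem.Int.floordiv val 85 = 0 := by
        rw [PySem.Int.floordiv_eq_iff_of_pos (by norm_num)]; omega
      rw [this]; decide
    rw [if_pos hA]
    simp only [hs, PySem.List.pyGet?, PySem.List.pyIdx?, pvRGB]
    norm_num
    ring_nf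
  · by_cases hB : val < 170
    · have hs : min (PySem.Int.floordiv val 85) 2 = 1 := by
        have : PySem.Int.floordiv val 85 = 1 := by
          rw [PySem.Int.floordiv_eq_iff_of_pos (by norm_num)]; omega
        rw [this]; decide
      rw [if_neg hA, if_pos hB]
      simp only [hs, PySem.List.pyGet?, PySem.List.pyIdx?, pvRGB]
      norm_num
      ring_nf
    · have hs : min (PySem.Int.floordiv val 85) 2 = 2 := by
        have h2 : 2 ≤ PySem.Int.floordiv val 85 := by
          rw [PySem.Int.le_floordiv_iff_mul_le (by norm_num)]; omega
        omega
      rw [if_neg hA, if_neg hB]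
      simp only [hs, PySem.List.pyGet?, PySem.List.pyIdx?, pvRGB]
      norm_num [show Int.toNat 2 = 2 from rfl]
      ring_nf

theorem gr_eq (val : Int) : gradient_rainbow val = gradient_rainbow_alt val := by
  by_cases h1 : val < 0
  · rw [gradient_rainbow, if_pos h1, alt_neg val h1]
    exact gr_eq (val + 255)
  · by_cases h2 : val > 255
    · rw [gradient_rainbow, if_neg h1, if_pos h2, alt_high val h2]
      exact gr_eq (val - 255)
    · exact base_eq val (by omega) (by omega)
termination_by (if val < 0 then 255 - val else val).toNat
decreasing_by all_goals (split_ifs <;> omega)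

-- ===== VERDICT (by name: the statement is the Claim_ definition above) =====
theorem gradient_rainbow_spec : Claim_equal_gradient_rainbow := by
  intro val _ _
  exact gr_eq val
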